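-- pv_equiv track=rewrite | github.com/SauravSinha76/scaler | class10/last_person.py | solve
-- ===== SOURCE A (Python) =====
-- def solve(A):
--     ans =0
--     s=1
--     while s <= A:
--         ans = s
--         s *= 2
--
--     p_killed = A-ans
--
--     return 2 * p_killed +1
-- ===== SOURCE B (Python) =====
-- def solve(A):
--     ans = (1 << (A.bit_length() - 1)) if A >= 1 else 0
--     return 2 * (A - ans) + 1
-- ===== Notes on version B (the rewrite author's own statement) =====
-- stated objective: idiomatic
-- what changed: The doubling while-loop that finds the highest power of two <= A is replaced by a closed-form bit_length computation (1 << (A.bit_length()-1)), with a guard for non-positive A; no loop remains.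
import Mathlib
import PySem

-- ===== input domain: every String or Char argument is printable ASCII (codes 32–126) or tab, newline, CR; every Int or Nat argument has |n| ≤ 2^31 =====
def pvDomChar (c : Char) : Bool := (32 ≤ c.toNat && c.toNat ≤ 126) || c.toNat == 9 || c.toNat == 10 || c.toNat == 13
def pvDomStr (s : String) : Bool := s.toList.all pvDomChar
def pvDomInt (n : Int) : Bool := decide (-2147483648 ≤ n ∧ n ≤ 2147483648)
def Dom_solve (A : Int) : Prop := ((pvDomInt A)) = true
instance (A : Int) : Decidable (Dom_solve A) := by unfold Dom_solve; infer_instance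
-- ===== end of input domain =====

-- B replaces A's doubling loop by the closed-form bit-length computation of the
-- highest power of two ≤ A (idiomatic, loop-free); same value everywhere.

-- ===== PORT A =====
-- the while-loop of A: while s <= A: ans = s; s *= 2   (0 < s is the loop invariant, needed for termination)
def solveLoop (A ans s : Int) (hs : 0 < s) : Int :=
  if _h : s ≤ A then solveLoop A s (2 * s) (by omega) else ans
termination_by (A + 1 - s).toNat
decreasing_by omega

def solve (A : Int) : Int :=
  let ans := solveLoop A 0 1 (by norm_num)
  let p_killed := A - ans
  2 * p_killed + 1

-- ===== PORT B =====
-- A.bit_length() for A ≥ 1 is Nat.size of A.toNat; 1 <<< k is the shift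
def solve_alt (A : Int) : Int :=
  let ans : Int := if 1 ≤ A then ((1 <<< (Nat.size A.toNat - 1) : Nat) : Int) else 0
  2 * (A - ans) + 1

-- ===== PRECONDITION & SPEC =====
def Spec_solve (A : Int) (out : Int) : Prop := out = solve_alt A
instance (A : Int) (out : Int) : Decidable (Spec_solve A out) := by unfold Spec_solve; infer_instance

-- ===== CLAIM (what is proved, stated in full; the proofs are below) =====
def Claim_equal_solve : Prop := ∀ (A : Int), Dom_solve A → Spec_solve A (solve A)

-- ===== LEMMAS AND PROOFS =====

-- the loop returns some s * 2^k lying in the half-open dyadic interval around A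
theorem solveLoop_char (A : Int) : ∀ (s ans : Int) (hs : 0 < s), s ≤ A →
    ∃ k : ℕ, solveLoop A ans s hs = s * 2 ^ k ∧ s * 2 ^ k ≤ A ∧ A < 2 * (s * 2 ^ k) := by
  intro s ans hs hsA
  induction ans, s, hs using solveLoop.induct A with
  | case1 ans s hs h ih =>
    rw [solveLoop, dif_pos h]
    by_cases h2 : 2 * s ≤ A
    · obtain ⟨k, hk, hle, hlt⟩ := ih h2
      refine ⟨k + 1, by rw [hk, pow_succ]; ring, ?_, ?_⟩
      · rw [pow_succ]; nlinarith [hle]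
      · rw [pow_succ]; nlinarith [hlt]
    · rw [solveLoop, dif_neg h2]
      exact ⟨0, by ring, by simpa using h, by omega⟩
  | case2 ans s hs h => exact absurd hsA h

-- two powers of two in the same dyadic interval around A coincide
theorem pow_two_interval_unique (A : Int) (i j : ℕ)
    (h1 : (2:Int) ^ i ≤ A) (h2 : A < 2 * 2 ^ i)
    (h3 : (2:Int) ^ j ≤ A) (h4 : A < 2 * 2 ^ j) : (2:Int) ^ i = 2 ^ j := by
  rcases lt_trichotomy i j with h | h | h
  · exfalso
    have : (2:Int) ^ (i+1) ≤ 2 ^ j := pow_le_pow_right₀ (by norm_num) (by omega)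
    rw [pow_succ] at this; omega
  · rw [h]
  · exfalso
    have : (2:Int) ^ (j+1) ≤ 2 ^ i := pow_le_pow_right₀ (by norm_num) (by omega)
    rw [pow_succ] at this; omega

theorem size_pow_le {n : ℕ} (hn : 1 ≤ n) : 2 ^ (Nat.size n - 1) ≤ n := by
  rw [← Nat.lt_size]
  have := Nat.size_pos.mpr (show 0 < n by omega)
  omega

theorem size_lt_pow (n : ℕ) : n < 2 ^ Nat.size n := Nat.lt_size_self n

theorem solve_alt_spec (A : Int) (hA : 1 ≤ A) :
    ∃ j : ℕ, (if 1 ≤ A then ((1 <<< (Nat.size A.toNat - 1) : Nat) : Int) else 0) = 2 ^ j ∧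
      (2:Int) ^ j ≤ A ∧ A < 2 * 2 ^ j := by
  rw [if_pos hA]
  have hn : 1 ≤ A.toNat := by omega
  refine ⟨Nat.size A.toNat - 1, ?_, ?_, ?_⟩
  · simp [Nat.shiftLeft_eq]
  · have := size_pow_le hn
    have : (2:Int) ^ (Nat.size A.toNat - 1) ≤ (A.toNat : Int) := by exact_mod_cast this
    omega
  · have h1 : 0 < Nat.size A.toNat := Nat.size_pos.mpr (by omega)
    have := size_lt_pow A.toNat
    have heq : Nat.size A.toNat = (Nat.size A.toNat - 1) + 1 := by omega
    rw [heq, pow_succ] at this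
    have : (A.toNat : Int) < 2 ^ (Nat.size A.toNat - 1) * 2 := by exact_mod_cast this
    omega

-- ===== VERDICT (by name: the statement is the Claim_ definition above) =====
theorem solve_spec : Claim_equal_solve := by
  intro A _
  unfold Spec_solve solve solve_alt
  by_cases hA : 1 ≤ A
  · obtain ⟨k, hk, hle, hlt⟩ := solveLoop_char A 1 0 (by norm_num) hA
    obtain ⟨j, hj, hjle, hjlt⟩ := solve_alt_spec A hA
    simp only [one_mul] at hk hle hlt
    have := pow_two_interval_unique A k j hle hlt hjle hjlt
    simp only [hk, hj]
    omega
  · rw [solveLoop, dif_neg (by omega : ¬ (1:Int) ≤ A), if_neg hA]
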